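-- pv_equiv track=rewrite | github.com/TurinFohlen/bili-merge-tool | error_log.py | decode_errors
-- ===== SOURCE A (Python) =====
-- from typing import Dict, List, Optional, Tuple, Any
--
-- prime_map: Dict[str, int] = {
--     "none":             1,   # 乘法单位元，代表无错误
--     "timeout":          2,
--     "permission_denied":3,
--     "file_not_found":   5,
--     "network_error":    7,
--     "disk_full":        11,
--     "auth_failed":      13,
--     "unknown":          17,  # 未识别异常的默认映射
-- }
--
-- def decode_errors(composite: int) -> List[str]:
--     """
--     逆向解码：通过因式分解从复合值还原错误类型列表。
--     基于算术基本定理（唯一分解定理），解码是唯一确定的。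
--     """
--     if composite <= 1:
--         return ["none"]
--     result = []
--     remaining = composite
--     for err, p in prime_map.items():
--         if p > 1 and remaining % p == 0:
--             result.append(err)
--             while remaining % p == 0:
--                 remaining //= p
--     return result if result else ["unknown"]
-- ===== SOURCE B (Python) =====
-- from typing import Dict, List
--
-- prime_map: Dict[str, int] = {
--     "none":             1,
--     "timeout":          2,
--     "permission_denied":3,
--     "file_not_found":   5,
--     "network_error":    7,
--     "disk_full":        11,
--     "auth_failed":      13,
--     "unknown":          17,
-- }
--
-- def decode_errors(composite: int) -> List[str]:
--     if composite <= 1: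
--         return ["none"]
--     inv = {p: err for err, p in prime_map.items() if p > 1}
--     result = []
--     n = composite
--     d = 2
--     while d * d <= n:
--         if n % d == 0:
--             if d in inv:
--                 result.append(inv[d])
--             while n % d == 0:
--                 n //= d
--         d += 1
--     if n > 1 and n in inv:
--         result.append(inv[n])
--     return result if result else ["unknown"]
-- ===== Notes on version B (the rewrite author's own statement) =====
-- stated objective: alternative
-- what changed: B fully factorizes the input by general trial division up to sqrt(n), mapping each distinct prime factor through an inverted prime->name dict, instead of testing divisibility by each of the seven mapped primes as A does.
import Mathlib
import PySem

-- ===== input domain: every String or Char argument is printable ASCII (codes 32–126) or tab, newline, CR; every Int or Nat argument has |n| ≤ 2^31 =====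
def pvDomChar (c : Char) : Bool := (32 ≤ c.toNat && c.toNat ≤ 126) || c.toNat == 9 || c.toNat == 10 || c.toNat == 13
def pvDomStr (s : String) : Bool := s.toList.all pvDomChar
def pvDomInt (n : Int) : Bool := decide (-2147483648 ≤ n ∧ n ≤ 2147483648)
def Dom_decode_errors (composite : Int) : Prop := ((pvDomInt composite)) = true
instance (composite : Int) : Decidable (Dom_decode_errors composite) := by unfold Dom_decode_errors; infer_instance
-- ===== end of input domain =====

-- B factorizes the input by general trial division up to sqrt(n) and maps distinct prime
-- factors through an inverted dict, instead of testing each of the seven mapped primes as A does.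

-- ===== PORT A =====
-- module-level constant prime_map (shared by both Python versions)
def pvPrimeMap : List (String × Int) :=
  [("none", 1), ("timeout", 2), ("permission_denied", 3), ("file_not_found", 5),
   ("network_error", 7), ("disk_full", 11), ("auth_failed", 13), ("unknown", 17)]

-- the inner `while remaining % p == 0: remaining //= p` loop, run on fuel (structural recursion);
-- the `1 < p ∧ 0 < remaining` conjuncts are totality guards only (they hold whenever A reaches the
-- loop) and `remaining.toNat` fuel always suffices, since each division strictly shrinks remaining
def pvDivOutAF : Nat → Int → Int → Int
  | 0, remaining, _ => remaining
  | fuel + 1, remaining, p =>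
    if 1 < p ∧ 0 < remaining ∧ PySem.Int.mod remaining p = 0 then
      pvDivOutAF fuel (PySem.Int.floordiv remaining p) p
    else remaining

def pvDivOutA (remaining p : Int) : Int := pvDivOutAF remaining.toNat remaining p

def decode_errors (composite : Int) : List String :=
  if composite ≤ 1 then ["none"]
  else
    let st := pvPrimeMap.foldl
      (fun (st : List String × Int) ep =>
        if 1 < ep.2 ∧ PySem.Int.mod st.2 ep.2 = 0 then
          (st.1 ++ [ep.1], pvDivOutA st.2 ep.2)
        else st)
      ([], composite)
    if st.1 = [] then ["unknown"] else st.1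

-- ===== PORT B =====
-- inv = {p: err for err, p in prime_map.items() if p > 1}
def pvInv : PySem.Dict Int String :=
  PySem.Dict.ofList ((pvPrimeMap.filter (fun ep => 1 < ep.2)).map (fun ep => (ep.2, ep.1)))

-- the inner `while n % d == 0: n //= d` loop of B, run on fuel like A's inner loop
def pvDivOutBF : Nat → Int → Int → Int
  | 0, n, _ => n
  | fuel + 1, n, d =>
    if 1 < d ∧ 0 < n ∧ PySem.Int.mod n d = 0 then
      pvDivOutBF fuel (PySem.Int.floordiv n d) d
    else n

def pvDivOutB (n d : Int) : Int := pvDivOutBF n.toNat n d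

-- the `while d * d <= n` loop, threading (n, d, result), run on fuel (structural recursion);
-- `(n + 1 - d).toNat` fuel always suffices, since d grows by 1 and n never grows
def pvTrialBF : Nat → Int → Int → List String → List String × Int
  | 0, n, _, result => (result, n)
  | fuel + 1, n, d, result =>
    if d * d ≤ n then
      if PySem.Int.mod n d = 0 then
        let result' := match PySem.Dict.get? pvInv d with
          | some s => result ++ [s]
          | none => result
        pvTrialBF fuel (pvDivOutB n d) (d + 1) result'
      else pvTrialBF fuel n (d + 1) result
    else (result, n)

def pvTrialB (n d : Int) (result : List String) : List String × Int :=
  pvTrialBF (n + 1 - d).toNat n d result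

def decode_errors_alt (composite : Int) : List String :=
  if composite ≤ 1 then ["none"]
  else
    let st := pvTrialB composite 2 []
    let result :=
      if 1 < st.2 then
        match PySem.Dict.get? pvInv st.2 with
        | some s => st.1 ++ [s]
        | none => st.1
      else st.1
    if result = [] then ["unknown"] else result

-- ===== PRECONDITION & SPEC =====
def Spec_decode_errors (composite : Int) (out : List String) : Prop := out = decode_errors_alt composite
instance (composite : Int) (out : List String) : Decidable (Spec_decode_errors composite out) := by unfold Spec_decode_errors; infer_instance

-- ===== CLAIM (what is proved, stated in full; the proofs are below) =====
def Claim_equal_decode_errors : Prop := ∀ (composite : Int), Dom_decode_errors composite → Spec_decode_errors composite (decode_errors composite)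

-- ===== LEMMAS AND PROOFS =====

-- Nat-level mirror of the mapped (name, prime) pairs, of the divide-out loops, and of B's trial
-- division; all the arithmetic is done here and transported to the Int ports by cast lemmas.
def pvMappedN : List (String × Nat) :=
  [("timeout", 2), ("permission_denied", 3), ("file_not_found", 5),
   ("network_error", 7), ("disk_full", 11), ("auth_failed", 13), ("unknown", 17)]

def pvCN (n : Nat) : List String :=
  (pvMappedN.filter (fun ep => decide (ep.2 ∣ n))).map Prod.fst

def pvDivOutN (r q : Nat) : Nat :=
  if h : 1 < q ∧ 0 < r ∧ r % q = 0 then pvDivOutN (r / q) q else r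
termination_by r
decreasing_by exact Nat.div_lt_self h.2.1 h.1

def pvOptName (m : Nat) : List String :=
  (pvMappedN.filter (fun ep => ep.2 == m)).map Prod.fst

theorem pvDivOutN_dvd (r q : Nat) : pvDivOutN r q ∣ r := by
  fun_induction pvDivOutN r q with
  | case1 r h ih =>
    obtain ⟨hq, hr, hm⟩ := h
    have hdvd : q ∣ r := Nat.dvd_of_mod_eq_zero hm
    exact dvd_trans ih (Nat.div_dvd_of_dvd hdvd)
  | case2 r h => exact dvd_refl r

def pvGN (n d : Nat) : List String :=
  if h : d * d ≤ n ∧ 2 ≤ d then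
    if d ∣ n then pvOptName d ++ pvGN (pvDivOutN n d) (d + 1) else pvGN n (d + 1)
  else if 1 < n then pvOptName n else []
termination_by (n + 1 - d)
decreasing_by
  · have hdn : d ≤ n := le_trans (by nlinarith [h.2]) h.1
    have h2 : pvDivOutN n d ∣ n := pvDivOutN_dvd n d
    have := Nat.le_of_dvd (by omega) h2
    omega
  · have hdn : d ≤ n := le_trans (by nlinarith [h.2]) h.1
    omega

-- properties of the divide-out loop (Nat level)
theorem pvDivOutN_pos (r q : Nat) (hr : 0 < r) : 0 < pvDivOutN r q := by
  fun_induction pvDivOutN r q with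
  | case1 r h ih =>
    obtain ⟨hq, hr', hm⟩ := h
    have hdvd : q ∣ r := Nat.dvd_of_mod_eq_zero hm
    exact ih (Nat.div_pos (Nat.le_of_dvd hr' hdvd) (by omega))
  | case2 r h => exact hr

theorem pvDivOutN_not_dvd (r q : Nat) (hq : 1 < q) (hr : 0 < r) : ¬ q ∣ pvDivOutN r q := by
  fun_induction pvDivOutN r q with
  | case1 r h ih =>
    obtain ⟨hq', hr', hm⟩ := h
    have hdvd : q ∣ r := Nat.dvd_of_mod_eq_zero hm
    exact ih (Nat.div_pos (Nat.le_of_dvd hr' hdvd) (by omega))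
  | case2 r h =>
    intro hdvd
    exact h ⟨hq, hr, Nat.dvd_iff_mod_eq_zero.mp hdvd⟩

theorem pvDivOutN_dvd_iff (r q k : Nat) (hr : 0 < r) (hcop : Nat.Coprime k q) :
    k ∣ pvDivOutN r q ↔ k ∣ r := by
  fun_induction pvDivOutN r q with
  | case1 r h ih =>
    obtain ⟨hq, hr', hm⟩ := h
    have hdvd : q ∣ r := Nat.dvd_of_mod_eq_zero hm
    have hpos : 0 < r / q := Nat.div_pos (Nat.le_of_dvd hr' hdvd) (by omega)
    rw [ih hpos]
    constructor
    · intro hk; exact dvd_trans hk (Nat.div_dvd_of_dvd hdvd)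
    · intro hk
      have heq : r / q * q = r := Nat.div_mul_cancel hdvd
      exact hcop.dvd_of_dvd_mul_right (by rw [heq]; exact hk)
  | case2 r h => exact Iff.rfl

-- cast bridges between the Int ports' loops and the Nat mirror
theorem pvDivOutAF_cast : ∀ (fuel r q : Nat), r ≤ fuel →
    pvDivOutAF fuel (r : Int) (q : Int) = ((pvDivOutN r q : Nat) : Int) := by
  intro fuel
  induction fuel with
  | zero =>
    intro r q hr
    have : r = 0 := by omega
    subst this
    rw [pvDivOutN]
    simp [pvDivOutAF]
  | succ fuel ih =>
    intro r q hr
    by_cases h : 1 < q ∧ 0 < r ∧ r % q = 0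
    · obtain ⟨hq, hr0, hm⟩ := h
      have hdvd : q ∣ r := Nat.dvd_of_mod_eq_zero hm
      have hcond : 1 < (q : Int) ∧ 0 < (r : Int) ∧ PySem.Int.mod (r : Int) (q : Int) = 0 :=
        ⟨by exact_mod_cast hq, by exact_mod_cast hr0,
         by rw [PySem.Int.mod_natCast]; exact_mod_cast hm⟩
      have hlt : r / q < r := Nat.div_lt_self hr0 hq
      rw [show pvDivOutAF (fuel + 1) (r : Int) (q : Int)
            = pvDivOutAF fuel (PySem.Int.floordiv (r : Int) (q : Int)) (q : Int) from by
          rw [pvDivOutAF, if_pos hcond]]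
      rw [PySem.Int.floordiv_natCast, ih (r / q) q (by omega)]
      conv_rhs => rw [pvDivOutN]
      rw [dif_pos ⟨hq, hr0, hm⟩]
    · have hcond : ¬ (1 < (q : Int) ∧ 0 < (r : Int) ∧ PySem.Int.mod (r : Int) (q : Int) = 0) := by
        rintro ⟨hq, hr0, hm⟩
        rw [PySem.Int.mod_natCast] at hm
        exact h ⟨by exact_mod_cast hq, by exact_mod_cast hr0, by exact_mod_cast hm⟩
      rw [show pvDivOutAF (fuel + 1) (r : Int) (q : Int) = (r : Int) from by
          rw [pvDivOutAF, if_neg hcond]]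
      rw [pvDivOutN, dif_neg h]

theorem pvDivOutA_cast (r q : Nat) : pvDivOutA (r : Int) (q : Int) = ((pvDivOutN r q : Nat) : Int) := by
  rw [pvDivOutA, Int.toNat_natCast]
  exact pvDivOutAF_cast r r q (le_refl r)

theorem pvDivOutBF_eq_AF : ∀ (fuel : Nat) (n d : Int), pvDivOutBF fuel n d = pvDivOutAF fuel n d := by
  intro fuel
  induction fuel with
  | zero => intro n d; rfl
  | succ fuel ih =>
    intro n d
    rw [pvDivOutBF, pvDivOutAF]
    split_ifs with h
    · exact ih _ _
    · rfl

theorem pvDivOutB_cast (r q : Nat) : pvDivOutB (r : Int) (q : Int) = ((pvDivOutN r q : Nat) : Int) := by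
  rw [pvDivOutB, Int.toNat_natCast, pvDivOutBF_eq_AF]
  exact pvDivOutAF_cast r r q (le_refl r)

theorem pvOptName_cast (m : Nat) :
    (match PySem.Dict.get? pvInv ((m : Nat) : Int) with
      | some s => [s]
      | none => ([] : List String)) = pvOptName m := by
  by_cases h2 : m = 2
  · subst h2; rfl
  by_cases h3 : m = 3
  · subst h3; rfl
  by_cases h5 : m = 5
  · subst h5; rfl
  by_cases h7 : m = 7
  · subst h7; rfl
  by_cases h11 : m = 11
  · subst h11; rfl
  by_cases h13 : m = 13
  · subst h13; rfl
  by_cases h17 : m = 17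
  · subst h17; rfl
  have hg : PySem.Dict.get? pvInv ((m : Nat) : Int) = none := by
    have z2 : ((m : Nat) : Int) ≠ 2 := by omega
    have z3 : ((m : Nat) : Int) ≠ 3 := by omega
    have z5 : ((m : Nat) : Int) ≠ 5 := by omega
    have z7 : ((m : Nat) : Int) ≠ 7 := by omega
    have z11 : ((m : Nat) : Int) ≠ 11 := by omega
    have z13 : ((m : Nat) : Int) ≠ 13 := by omega
    have z17 : ((m : Nat) : Int) ≠ 17 := by omega
    have hmk : pvInv = PySem.Dict.mk [((2 : Int), "timeout"), (3, "permission_denied"),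
        (5, "file_not_found"), (7, "network_error"), (11, "disk_full"), (13, "auth_failed"),
        (17, "unknown")] := by decide
    rw [hmk]
    simp [Ne.symm z2, Ne.symm z3, Ne.symm z5, Ne.symm z7, Ne.symm z11, Ne.symm z13,
      Ne.symm z17, PySem.Dict.get?]
  rw [hg]
  simp [pvOptName, pvMappedN]
  omega

theorem pvMappedN_primes : ∀ ep ∈ pvMappedN, Nat.Prime ep.2 := by decide

-- A's fold over the mapped pairs only tests divisibility of the original number
theorem pvFoldA_eq (LN : List (String × Nat)) (acc : List String) (r n : Nat) (hr : 0 < r)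
    (hprime : ∀ ep ∈ LN, Nat.Prime ep.2)
    (hiff : ∀ ep ∈ LN, (ep.2 ∣ r ↔ ep.2 ∣ n))
    (hnd : (LN.map Prod.snd).Nodup) :
    ((LN.map (fun ep => (ep.1, (ep.2 : Int)))).foldl
        (fun (st : List String × Int) ep =>
          if 1 < ep.2 ∧ PySem.Int.mod st.2 ep.2 = 0 then (st.1 ++ [ep.1], pvDivOutA st.2 ep.2)
          else st)
        (acc, (r : Int))).1
      = acc ++ (LN.filter (fun ep => decide (ep.2 ∣ n))).map Prod.fst := by
  induction LN generalizing acc r with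
  | nil => simp
  | cons hd tl ih =>
    obtain ⟨e, p⟩ := hd
    have hp : Nat.Prime p := hprime (e, p) List.mem_cons_self
    have hiff0 : p ∣ r ↔ p ∣ n := hiff (e, p) List.mem_cons_self
    have hnd' : p ∉ tl.map Prod.snd ∧ (tl.map Prod.snd).Nodup := by
      rw [List.map_cons, List.nodup_cons] at hnd; exact hnd
    simp only [List.map_cons, List.foldl_cons, List.filter_cons]
    by_cases hdv : p ∣ n
    · have hdr : p ∣ r := hiff0.mpr hdv
      have hcond : 1 < ((p : Nat) : Int) ∧ PySem.Int.mod (r : Int) (p : Int) = 0 :=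
        ⟨by exact_mod_cast hp.one_lt,
         by rw [PySem.Int.mod_natCast]
            exact_mod_cast Nat.dvd_iff_mod_eq_zero.mp hdr⟩
      rw [if_pos hcond, pvDivOutA_cast]
      rw [ih (acc ++ [e]) (pvDivOutN r p) (pvDivOutN_pos r p hr)
        (fun ep hep => hprime ep (List.mem_cons_of_mem _ hep))
        (fun ep hep => by
          have hp' : Nat.Prime ep.2 := hprime ep (List.mem_cons_of_mem _ hep)
          have hne : ep.2 ≠ p := by
            intro hcon
            exact hnd'.1 (hcon ▸ List.mem_map_of_mem hep)
          have hcop : Nat.Coprime ep.2 p := (Nat.coprime_primes hp' hp).mpr hne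
          rw [pvDivOutN_dvd_iff _ _ _ hr hcop]
          exact hiff ep (List.mem_cons_of_mem _ hep))
        hnd'.2]
      simp [hdv]
    · have hdr : ¬ p ∣ r := fun h => hdv (hiff0.mp h)
      have hcond : ¬ (1 < ((p : Nat) : Int) ∧ PySem.Int.mod (r : Int) (p : Int) = 0) := by
        rintro ⟨-, hm⟩
        rw [PySem.Int.mod_natCast] at hm
        exact hdr (Nat.dvd_of_mod_eq_zero (by exact_mod_cast hm))
      rw [if_neg hcond]
      rw [ih acc r hr
        (fun ep hep => hprime ep (List.mem_cons_of_mem _ hep))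
        (fun ep hep => hiff ep (List.mem_cons_of_mem _ hep))
        hnd'.2]
      simp [hdv]

-- primality facts used by the trial-division analysis
theorem pv_d_prime (n d : Nat) (hd : 2 ≤ d) (hdn : d ∣ n)
    (hsm : ∀ k, 2 ≤ k → k < d → ¬ k ∣ n) : Nat.Prime d := by
  rw [Nat.prime_def_lt]
  refine ⟨hd, fun m hmlt hmd => ?_⟩
  by_contra hm1
  have hm0 : m ≠ 0 := by
    rintro rfl
    have := Nat.eq_zero_of_zero_dvd hmd
    omega
  exact hsm m (by omega) hmlt (dvd_trans hmd hdn)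

theorem pv_n_prime (n d : Nat) (hn : 2 ≤ n) (hlt : n < d * d)
    (hsm : ∀ k, 2 ≤ k → k < d → ¬ k ∣ n) : Nat.Prime n := by
  by_contra hnp
  have h1 : n.minFac ^ 2 ≤ n := Nat.minFac_sq_le_self (by omega) hnp
  have hp := Nat.minFac_prime (show n ≠ 1 by omega)
  have hdvd := Nat.minFac_dvd n
  have hlt' : n.minFac < d := by nlinarith [hp.two_le]
  exact hsm n.minFac hp.two_le hlt' hdvd

theorem pv_terminal (n d : Nat) (hn : 2 ≤ n) (hp : Nat.Prime n) (hdn : d ≤ n) :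
    pvOptName n
      = (pvMappedN.filter (fun ep => decide (d ≤ ep.2) && decide (ep.2 ∣ n))).map Prod.fst := by
  unfold pvOptName
  have hcg : ∀ ep ∈ pvMappedN, (ep.2 == n) = (decide (d ≤ ep.2) && decide (ep.2 ∣ n)) := by
    intro ep hep
    have hpp : Nat.Prime ep.2 := pvMappedN_primes ep hep
    by_cases he : ep.2 = n
    · simp [he, hdn]
    · simp [he, Nat.prime_dvd_prime_iff_eq hpp hp]
  rw [List.filter_congr hcg]

theorem pv_split (n d : Nat) (hd : 2 ≤ d) (hdn : d ∣ n) :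
    pvOptName d ++ (pvMappedN.filter (fun ep => decide (d + 1 ≤ ep.2) && decide (ep.2 ∣ n))).map Prod.fst
      = (pvMappedN.filter (fun ep => decide (d ≤ ep.2) && decide (ep.2 ∣ n))).map Prod.fst := by
  by_cases h2 : d = 2
  · subst h2; simp [pvOptName, pvMappedN, hdn, List.filter_cons]
  by_cases h3 : d = 3
  · subst h3; simp [pvOptName, pvMappedN, hdn, List.filter_cons]
  by_cases h5 : d = 5
  · subst h5; simp [pvOptName, pvMappedN, hdn, List.filter_cons]
  by_cases h7 : d = 7
  · subst h7; simp [pvOptName, pvMappedN, hdn, List.filter_cons]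
  by_cases h11 : d = 11
  · subst h11; simp [pvOptName, pvMappedN, hdn, List.filter_cons]
  by_cases h13 : d = 13
  · subst h13; simp [pvOptName, pvMappedN, hdn, List.filter_cons]
  by_cases h17 : d = 17
  · subst h17; simp [pvOptName, pvMappedN, hdn, List.filter_cons]
  have hempty : pvOptName d = [] := by
    simp [pvOptName, pvMappedN]
    omega
  rw [hempty, List.nil_append]
  have hcg : ∀ ep ∈ pvMappedN, (decide (d + 1 ≤ ep.2) && decide (ep.2 ∣ n))
      = (decide (d ≤ ep.2) && decide (ep.2 ∣ n)) := by
    intro ep hep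
    have hne : ep.2 ≠ d := by
      fin_cases hep <;> simp <;> omega
    have : (d + 1 ≤ ep.2) ↔ (d ≤ ep.2) := by omega
    simp [this]
  rw [List.filter_congr hcg]

theorem pv_shift (n d : Nat) (hnd : ¬ d ∣ n) :
    pvMappedN.filter (fun ep => decide (d ≤ ep.2) && decide (ep.2 ∣ n))
      = pvMappedN.filter (fun ep => decide (d + 1 ≤ ep.2) && decide (ep.2 ∣ n)) := by
  apply List.filter_congr
  intro ep hep
  by_cases he : ep.2 = d
  · rw [he]
    simp [hnd]
  · have : (d ≤ ep.2) ↔ (d + 1 ≤ ep.2) := by omega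
    simp [this]

-- main characterisation of the trial-division loop
theorem pvGN_spec : ∀ μ n d, n + 1 - d = μ → 1 ≤ n → 2 ≤ d →
    (∀ k, 2 ≤ k → k < d → ¬ k ∣ n) →
    pvGN n d
      = (pvMappedN.filter (fun ep => decide (d ≤ ep.2) && decide (ep.2 ∣ n))).map Prod.fst := by
  intro μ
  induction μ using Nat.strong_induction_on with
  | _ μ ih =>
    intro n d hμ hn hd hsm
    rw [pvGN]
    by_cases hc : d * d ≤ n ∧ 2 ≤ d
    · rw [dif_pos hc]
      have hdle : d ≤ n := le_trans (by nlinarith) hc.1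
      by_cases hdn : d ∣ n
      · rw [if_pos hdn]
        have hdp := pv_d_prime n d hd hdn hsm
        have hw : 0 < pvDivOutN n d := pvDivOutN_pos n d (by omega)
        have hnd' : ¬ d ∣ pvDivOutN n d := pvDivOutN_not_dvd n d hdp.one_lt (by omega)
        have hdvdn : pvDivOutN n d ∣ n := pvDivOutN_dvd n d
        have hle : pvDivOutN n d ≤ n := Nat.le_of_dvd (by omega) hdvdn
        have hsm' : ∀ k, 2 ≤ k → k < d + 1 → ¬ k ∣ pvDivOutN n d := by
          intro k h2k hk hkd
          by_cases hkd' : k = d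
          · exact hnd' (hkd' ▸ hkd)
          · exact hsm k h2k (by omega) (dvd_trans hkd hdvdn)
        rw [ih (pvDivOutN n d + 1 - (d + 1)) (by omega) (pvDivOutN n d) (d + 1) rfl
          (by omega) (by omega) hsm']
        have hcg : ∀ ep ∈ pvMappedN,
            (decide (d + 1 ≤ ep.2) && decide (ep.2 ∣ pvDivOutN n d))
              = (decide (d + 1 ≤ ep.2) && decide (ep.2 ∣ n)) := by
          intro ep hep
          by_cases hle' : d + 1 ≤ ep.2
          · have hpp := pvMappedN_primes ep hep
            have hne : ep.2 ≠ d := by omega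
            have hcop : Nat.Coprime ep.2 d := (Nat.coprime_primes hpp hdp).mpr hne
            simp [pvDivOutN_dvd_iff n d ep.2 (by omega) hcop]
          · simp [hle']
        rw [List.filter_congr hcg]
        exact pv_split n d hd hdn
      · rw [if_neg hdn]
        rw [ih (n + 1 - (d + 1)) (by omega) n (d + 1) rfl hn (by omega)
          (fun k h2k hk hkd => by
            by_cases hkd' : k = d
            · exact hdn (hkd' ▸ hkd)
            · exact hsm k h2k (by omega) hkd)]
        rw [pv_shift n d hdn]
    · rw [dif_neg hc]
      have hdd : ¬ d * d ≤ n := fun h => hc ⟨h, hd⟩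
      by_cases h1 : 1 < n
      · rw [if_pos h1]
        have hp := pv_n_prime n d (by omega) (by omega) hsm
        have hdle : d ≤ n := by
          by_contra hcon
          exact hsm n (by omega) (by omega) dvd_rfl
        exact pv_terminal n d (by omega) hp hdle
      · rw [if_neg h1]
        have hn1 : n = 1 := by omega
        subst hn1
        have hnil : pvMappedN.filter (fun ep => decide (d ≤ ep.2) && decide (ep.2 ∣ 1)) = [] := by
          simp [pvMappedN, List.filter_cons]
        rw [hnil]
        rfl

-- the Int loop of B (plus the post-loop check) computes the Nat mirror pvGN
theorem pvBridgeB : ∀ (fuel : Nat) (n d : Nat) (acc : List String), n + 1 - d ≤ fuel → 1 ≤ n → 2 ≤ d →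
    (if 1 < (pvTrialBF fuel (n : Int) (d : Int) acc).2 then
      match PySem.Dict.get? pvInv (pvTrialBF fuel (n : Int) (d : Int) acc).2 with
      | some s => (pvTrialBF fuel (n : Int) (d : Int) acc).1 ++ [s]
      | none => (pvTrialBF fuel (n : Int) (d : Int) acc).1
     else (pvTrialBF fuel (n : Int) (d : Int) acc).1)
      = acc ++ pvGN n d := by
  intro fuel
  induction fuel with
  | zero =>
    intro n d acc hμ hn hd
    have hnd : n < d := by omega
    have hdd : ¬ d * d ≤ n := by nlinarith
    rw [show pvTrialBF 0 (n : Int) (d : Int) acc = (acc, (n : Int)) from rfl]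
    rw [pvGN, dif_neg (fun hcc => hdd hcc.1)]
    by_cases h1 : 1 < n
    · have h1I : (1 : Int) < ((n : Nat) : Int) := by exact_mod_cast h1
      rw [if_pos h1I, if_pos h1]
      have hopt := pvOptName_cast n
      cases hg : PySem.Dict.get? pvInv ((n : Nat) : Int) with
      | some s => rw [← hopt, hg]
      | none =>
        rw [← hopt, hg]
        simp
    · have h1I : ¬ (1 : Int) < ((n : Nat) : Int) := by exact_mod_cast h1
      rw [if_neg h1I, if_neg h1, List.append_nil]
  | succ fuel ih =>
    intro n d acc hμ hn hd
    by_cases hc : d * d ≤ n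
    · have hdle : d ≤ n := le_trans (by nlinarith) hc
      have hcI : (d : Int) * (d : Int) ≤ (n : Int) := by exact_mod_cast hc
      rw [show pvTrialBF (fuel + 1) (n : Int) (d : Int) acc
            = if PySem.Int.mod (n : Int) (d : Int) = 0 then
                pvTrialBF fuel (pvDivOutB (n : Int) (d : Int)) ((d : Int) + 1)
                  (match PySem.Dict.get? pvInv (d : Int) with
                    | some s => acc ++ [s]
                    | none => acc)
              else pvTrialBF fuel (n : Int) ((d : Int) + 1) acc from by
          rw [pvTrialBF, if_pos hcI]]
      rw [pvGN, dif_pos ⟨hc, hd⟩]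
      have hd1 : (d : Int) + 1 = ((d + 1 : Nat) : Int) := by push_cast; ring
      by_cases hdn : d ∣ n
      · have hmod : PySem.Int.mod (n : Int) (d : Int) = 0 := by
          rw [PySem.Int.mod_natCast]
          exact_mod_cast Nat.dvd_iff_mod_eq_zero.mp hdn
        rw [if_pos hmod, if_pos hdn, pvDivOutB_cast, hd1]
        have hw : 0 < pvDivOutN n d := pvDivOutN_pos n d (by omega)
        have hle : pvDivOutN n d ≤ n := Nat.le_of_dvd (by omega) (pvDivOutN_dvd n d)
        have hopt := pvOptName_cast d
        cases hg : PySem.Dict.get? pvInv ((d : Nat) : Int) with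
        | some s =>
          rw [ih (pvDivOutN n d) (d + 1) (acc ++ [s]) (by omega) (by omega) (by omega)]
          rw [← hopt, hg]
          simp
        | none =>
          rw [ih (pvDivOutN n d) (d + 1) acc (by omega) (by omega) (by omega)]
          rw [← hopt, hg]
          simp
      · have hmod : ¬ PySem.Int.mod (n : Int) (d : Int) = 0 := by
          rw [PySem.Int.mod_natCast]
          intro hcon
          exact hdn (Nat.dvd_of_mod_eq_zero (by exact_mod_cast hcon))
        rw [if_neg hmod, if_neg hdn, hd1]
        exact ih n (d + 1) acc (by omega) hn (by omega)
    · have hcI : ¬ ((d : Int) * (d : Int) ≤ (n : Int)) := fun hcc => hc (by exact_mod_cast hcc)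
      rw [show pvTrialBF (fuel + 1) (n : Int) (d : Int) acc = (acc, (n : Int)) from by
          rw [pvTrialBF, if_neg hcI]]
      rw [pvGN, dif_neg (fun hcc => hc hcc.1)]
      by_cases h1 : 1 < n
      · have h1I : (1 : Int) < ((n : Nat) : Int) := by exact_mod_cast h1
        rw [if_pos h1I, if_pos h1]
        have hopt := pvOptName_cast n
        cases hg : PySem.Dict.get? pvInv ((n : Nat) : Int) with
        | some s => rw [← hopt, hg]
        | none =>
          rw [← hopt, hg]
          simp
      · have h1I : ¬ (1 : Int) < ((n : Nat) : Int) := by exact_mod_cast h1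
        rw [if_neg h1I, if_neg h1, List.append_nil]

theorem pvA_eq (n : Nat) (hn : 2 ≤ n) :
    decode_errors (n : Int) = (if pvCN n = [] then ["unknown"] else pvCN n) := by
  have hle : ¬ ((n : Int) ≤ 1) := by exact_mod_cast (by omega : ¬ ((n : Nat) ≤ 1))
  rw [decode_errors, if_neg hle]
  have hm : pvPrimeMap = ("none", (1 : Int)) :: pvMappedN.map (fun ep => (ep.1, (ep.2 : Int))) := by
    rfl
  rw [hm]
  simp only [List.foldl_cons]
  rw [if_neg (show ¬ ((1 : Int) < 1 ∧ PySem.Int.mod ((n : Nat) : Int) 1 = 0) from by simp)]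
  rw [pvFoldA_eq pvMappedN [] n n (by omega) pvMappedN_primes (fun _ _ => Iff.rfl) (by decide)]
  rw [pvCN]
  simp

theorem pvB_eq (n : Nat) (hn : 2 ≤ n) :
    decode_errors_alt (n : Int) = (if pvCN n = [] then ["unknown"] else pvCN n) := by
  have hle : ¬ ((n : Int) ≤ 1) := by exact_mod_cast (by omega : ¬ ((n : Nat) ≤ 1))
  rw [decode_errors_alt, if_neg hle]
  have h2 : (2 : Int) = ((2 : Nat) : Int) := by norm_num
  rw [h2]
  have hfuel : (((n : Nat) : Int) + 1 - ((2 : Nat) : Int)).toNat = n + 1 - 2 := by omega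
  have hb := pvBridgeB (n + 1 - 2) n 2 [] (le_refl _) (by omega) (by omega)
  rw [List.nil_append] at hb
  rw [pvTrialB, hfuel] at *
  simp only [pvTrialB, hfuel, hb]
  rw [pvGN_spec (n + 1 - 2) n 2 rfl (by omega) (by omega) (by omega)]
  have hcg : ∀ ep ∈ pvMappedN, (decide (2 ≤ ep.2) && decide (ep.2 ∣ n)) = decide (ep.2 ∣ n) := by
    intro ep hep
    have : 2 ≤ ep.2 := (pvMappedN_primes ep hep).two_le
    simp [this]
  rw [List.filter_congr hcg, pvCN]

-- ===== VERDICT (by name: the statement is the Claim_ definition above) =====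
theorem decode_errors_spec : Claim_equal_decode_errors := by
  intro composite _
  unfold Spec_decode_errors
  by_cases hc : composite ≤ 1
  · simp [decode_errors, decode_errors_alt, hc]
  · have h2 : 2 ≤ composite := by omega
    have hcast : composite = ((composite.toNat : Nat) : Int) := (Int.toNat_of_nonneg (by omega)).symm
    have hn : 2 ≤ composite.toNat := by omega
    rw [hcast, pvA_eq _ hn, pvB_eq _ hn]
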